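-- pv_equiv track=rewrite | github.com/MrOrdenador/adventjs-2025 | day12/.py | elf_battle
-- ===== SOURCE A (Python) =====
-- def elf_battle(elf1: str, elf2: str) -> int:
--   hp1, hp2 = 3, 3
--
--   damage_table = {
--     'A': {'B': 0, 'A': -1, 'F': -1},
--     'F': {'B': -2, 'A': -2, 'F': -2}
--   }
--
--   def calc_damage(attack, defense):
--     # In case the move is invalid
--     if attack not in damage_table or defense not in damage_table[attack]:
--       return 0
--     return damage_table[attack][defense]
--
--   for move1, move2 in zip(elf1, elf2):
--     damage_to_hp2 = calc_damage(move1, move2)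
--     damage_to_hp1 = calc_damage(move2, move1)
--
--     hp2 += damage_to_hp2
--     hp1 += damage_to_hp1
--
--     if hp1 <= 0 or hp2 <= 0:
--       break
--
--   if hp1 == hp2:
--     return 0
--   return 1 if hp1 > hp2 else 2
-- ===== SOURCE B (Python) =====
-- from itertools import accumulate
--
--
-- def elf_battle(elf1: str, elf2: str) -> int:
--     def dmg(attack, defense):
--         if attack == 'F':
--             return -2 if defense in 'ABF' else 0
--         if attack == 'A':
--             return -1 if defense in 'AF' else 0
--         return 0
--
--     pairs = list(zip(elf1, elf2))
--     d1 = [dmg(m2, m1) for m1, m2 in pairs]          # damage taken by elf1 each round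
--     d2 = [dmg(m1, m2) for m1, m2 in pairs]          # damage taken by elf2 each round
--     hp1_seq = list(accumulate(d1, initial=3))[1:]   # elf1 HP after each round
--     hp2_seq = list(accumulate(d2, initial=3))[1:]   # elf2 HP after each round
--
--     hp1, hp2 = next(((a, b) for a, b in zip(hp1_seq, hp2_seq) if a <= 0 or b <= 0),
--                     (hp1_seq[-1], hp2_seq[-1]) if pairs else (3, 3))
--
--     if hp1 == hp2:
--         return 0
--     return 1 if hp1 > hp2 else 2
-- ===== Notes on version B (the rewrite author's own statement) =====
-- stated objective: alternative
-- what changed: Replaces the stateful simulation loop with a data-flow decomposition: per-round damage lists, prefix-accumulated HP sequences, then a single scan for the first round where either HP drops to 0 or below.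
import Mathlib
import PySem

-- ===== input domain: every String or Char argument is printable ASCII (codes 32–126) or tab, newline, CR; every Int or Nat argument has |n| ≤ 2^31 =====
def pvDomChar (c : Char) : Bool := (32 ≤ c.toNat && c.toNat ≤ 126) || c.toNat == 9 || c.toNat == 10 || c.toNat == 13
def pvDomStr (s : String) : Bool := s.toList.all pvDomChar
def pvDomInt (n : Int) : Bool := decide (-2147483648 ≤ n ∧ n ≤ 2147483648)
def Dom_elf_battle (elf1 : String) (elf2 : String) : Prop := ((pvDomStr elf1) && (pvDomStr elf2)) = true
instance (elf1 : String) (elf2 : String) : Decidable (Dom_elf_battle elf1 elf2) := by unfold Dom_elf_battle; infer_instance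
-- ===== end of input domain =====

-- B replaces A's stateful simulation loop by a data-flow decomposition (damage lists,
-- prefix-accumulated HP sequences, first-failing-round scan); return values proved equal, no speed claim.

-- ===== PORT A =====
-- calc_damage with the literal dict inlined as nested conditionals (exact on all chars:
-- a key is present iff it equals one of the literal keys).
def pvCalcDamageA (attack : Char) (defense : Char) : Int :=
  if attack = 'A' then
    (if defense = 'B' then 0 else if defense = 'A' then -1 else if defense = 'F' then -1 else 0)
  else if attack = 'F' then
    (if defense = 'B' then -2 else if defense = 'A' then -2 else if defense = 'F' then -2 else 0)
  else 0

-- the for-loop over zip(elf1, elf2) with its break, carrying (hp1, hp2)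
def pvLoopA : List (Char × Char) → Int → Int → Int × Int
  | [], hp1, hp2 => (hp1, hp2)
  | (m1, m2) :: rest, hp1, hp2 =>
      let damage_to_hp2 := pvCalcDamageA m1 m2
      let damage_to_hp1 := pvCalcDamageA m2 m1
      let hp2' := hp2 + damage_to_hp2
      let hp1' := hp1 + damage_to_hp1
      if hp1' ≤ 0 ∨ hp2' ≤ 0 then (hp1', hp2') else pvLoopA rest hp1' hp2'

def elf_battle (elf1 : String) (elf2 : String) : Int :=
  let r := pvLoopA (elf1.toList.zip elf2.toList) 3 3
  if r.1 = r.2 then 0 else if r.1 > r.2 then 1 else 2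

-- ===== PORT B =====
def pvDmgB (attack : Char) (defense : Char) : Int :=
  if attack = 'F' then (if defense = 'A' ∨ defense = 'B' ∨ defense = 'F' then -2 else 0)
  else if attack = 'A' then (if defense = 'A' ∨ defense = 'F' then -1 else 0)
  else 0

-- itertools.accumulate(ds, initial=init) with the initial element dropped ([1:])
def pvAccum (init : Int) : List Int → List Int
  | [] => []
  | d :: rest => (init + d) :: pvAccum (init + d) rest

-- next(((a,b) for a,b in zip(hp1_seq, hp2_seq) if a <= 0 or b <= 0), default=none)
def pvFirstBad : List Int → List Int → Option (Int × Int)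
  | a :: r1, b :: r2 => if a ≤ 0 ∨ b ≤ 0 then some (a, b) else pvFirstBad r1 r2
  | _, _ => none

def elf_battle_alt (elf1 : String) (elf2 : String) : Int :=
  let pairs := elf1.toList.zip elf2.toList
  let d1 := pairs.map (fun p => pvDmgB p.2 p.1)
  let d2 := pairs.map (fun p => pvDmgB p.1 p.2)
  let hp1Seq := pvAccum 3 d1
  let hp2Seq := pvAccum 3 d2
  let hp : Int × Int := match pvFirstBad hp1Seq hp2Seq with
    | some p => p
    | none => if pairs = [] then (3, 3) else (hp1Seq.getLastD 3, hp2Seq.getLastD 3)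
  if hp.1 = hp.2 then 0 else if hp.1 > hp.2 then 1 else 2

-- ===== PRECONDITION & SPEC =====
def Spec_elf_battle (elf1 : String) (elf2 : String) (out : Int) : Prop := out = elf_battle_alt elf1 elf2
instance (elf1 : String) (elf2 : String) (out : Int) : Decidable (Spec_elf_battle elf1 elf2 out) := by unfold Spec_elf_battle; infer_instance

-- ===== CLAIM (what is proved, stated in full; the proofs are below) =====
def Claim_equal_elf_battle : Prop := ∀ (elf1 : String) (elf2 : String), Dom_elf_battle elf1 elf2 → Spec_elf_battle elf1 elf2 (elf_battle elf1 elf2)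

-- ===== LEMMAS AND PROOFS =====

theorem dmg_eq (a d : Char) : pvCalcDamageA a d = pvDmgB a d := by
  unfold pvCalcDamageA pvDmgB
  by_cases hA : a = 'A' <;> by_cases hF : a = 'F' <;> simp_all <;> split_ifs <;> simp_all

-- A's loop computes the first HP pair along the accumulated sequences where either side is ≤ 0,
-- and the last pair (default: start) if none.
theorem getLastD_cons' (a d : Int) (l : List Int) :
    (a :: l).getLast?.getD d = l.getLast?.getD a := by
  cases l with
  | nil => simp
  | cons b r => cases hx : (b :: r).getLast? with
    | none => simp at hx
    | some x => simp [hx]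

theorem loop_eq (ms : List (Char × Char)) : ∀ (h1 h2 : Int),
    pvLoopA ms h1 h2 =
      match pvFirstBad (pvAccum h1 (ms.map (fun p => pvDmgB p.2 p.1)))
                       (pvAccum h2 (ms.map (fun p => pvDmgB p.1 p.2))) with
      | some p => p
      | none => ((pvAccum h1 (ms.map (fun p => pvDmgB p.2 p.1))).getLastD h1,
                 (pvAccum h2 (ms.map (fun p => pvDmgB p.1 p.2))).getLastD h2) := by
  induction ms with
  | nil => intro h1 h2; simp [pvLoopA, pvAccum, pvFirstBad]
  | cons m rest ih =>
      intro h1 h2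
      obtain ⟨m1, m2⟩ := m
      simp only [pvLoopA, List.map_cons, pvAccum, pvFirstBad, dmg_eq]
      by_cases hbad : h1 + pvDmgB m2 m1 ≤ 0 ∨ h2 + pvDmgB m1 m2 ≤ 0
      · simp [hbad]
      · rw [ih]
        cases hfb : pvFirstBad (pvAccum (h1 + pvDmgB m2 m1) (List.map (fun p => pvDmgB p.2 p.1) rest))
            (pvAccum (h2 + pvDmgB m1 m2) (List.map (fun p => pvDmgB p.1 p.2) rest)) with
        | some p => simp [hbad]
        | none => simp [hbad, getLastD_cons']

theorem elf_battle_spec' (elf1 elf2 : String) : elf_battle elf1 elf2 = elf_battle_alt elf1 elf2 := by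
  unfold elf_battle elf_battle_alt
  rw [loop_eq]
  cases h : elf1.toList.zip elf2.toList with
  | nil => simp [pvAccum, pvFirstBad]
  | cons p rest => simp

-- ===== VERDICT (by name: the statement is the Claim_ definition above) =====
theorem elf_battle_spec : Claim_equal_elf_battle := by
  intro elf1 elf2 _
  unfold Spec_elf_battle
  exact elf_battle_spec' elf1 elf2
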